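-- pv_equiv track=rewrite | github.com/Jeremy-Varange/Python | mot_de_passe/Testeur_mdp.py | determine_alphabet_size
-- ===== SOURCE A (Python) =====
-- def determine_alphabet_size(password):
--
--     # Si le mot de passe contient des caractères spéciaux étendus
--     if any(char in "&[|]@^µ§:/ ;.,<>°²³" for char in password):
--         return 90
--
--     # Si le mot de passe contient des caractères spéciaux standards
--     elif any(char in "!#$*%?" for char in password):
--         return 70
--
--     # Si le mot de passe contient à la fois des lettres et des chiffres
--     elif any(char.isalpha() for char in password) and any(char.isdigit() for char in password):
--         return 62
--
--     # Si le mot de passe contient à la fois des lettres minuscules, majuscules et des chiffres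
--     elif any(char.isalpha() for char in password) and any(char.islower() for char in password) and any(
--             char.isupper() for char in password):
--         return 52
--
--     # Si le mot de passe contient uniquement des lettres
--     elif any(char.isalpha() for char in password):
--         return 26
--
--     # Si le mot de passe contient des chiffres et des lettres majuscules
--     elif any(char.isdigit() for char in password) and any(
--             char.isalpha() and char.upper() <= 'Z' for char in password):
--         return 36
--
--     # Si le mot de passe contient des chiffres et des lettres majuscules jusqu'à F
--     elif any(char.isdigit() for char in password) and any(
--             char.isalpha() and char.upper() <= 'F' for char in password):
--         return 16
--
--     # Si le mot de passe contient uniquement des 0 et des 1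
--     elif all(char in '01' for char in password):
--         return 2
--
--     # Si le mot de passe contient uniquement des chiffres
--     elif any(char.isdigit() for char in password):
--         return 10
--
--     # Par défaut, retourne 70 (taille par défaut)
--     else:
--         return 70
-- ===== SOURCE B (Python) =====
-- def determine_alphabet_size(password):
--     # One pass over the password computing all flags, then a flat cascade.
--     has_ext = has_std = has_alpha = has_digit = False
--     has_lower = has_upper = has_upto_Z = has_upto_F = False
--     all_binary = True
--     for c in password:
--         if c in "&[|]@^µ§:/ ;.,<>°²³":
--             has_ext = True
--         if c in "!#$*%?":
--             has_std = True
--         if c.isalpha():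
--             has_alpha = True
--             u = c.upper()
--             if u <= 'Z':
--                 has_upto_Z = True
--             if u <= 'F':
--                 has_upto_F = True
--         if c.isdigit():
--             has_digit = True
--         if c.islower():
--             has_lower = True
--         if c.isupper():
--             has_upper = True
--         if c not in '01':
--             all_binary = False
--     if has_ext:
--         return 90
--     if has_std:
--         return 70
--     if has_alpha and has_digit:
--         return 62
--     if has_alpha and has_lower and has_upper:
--         return 52
--     if has_alpha:
--         return 26
--     if has_digit and has_upto_Z:
--         return 36
--     if has_digit and has_upto_F:
--         return 16
--     if all_binary:
--         return 2
--     if has_digit: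
--         return 10
--     return 70
-- ===== Notes on version B (the rewrite author's own statement) =====
-- stated objective: alternative
-- what changed: Replaced A's ~13 independent generator scans of the password (one per any/all test in the cascade) by a single loop that accumulates nine boolean flags, followed by the same ordered cascade on the flags.
import Mathlib
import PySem

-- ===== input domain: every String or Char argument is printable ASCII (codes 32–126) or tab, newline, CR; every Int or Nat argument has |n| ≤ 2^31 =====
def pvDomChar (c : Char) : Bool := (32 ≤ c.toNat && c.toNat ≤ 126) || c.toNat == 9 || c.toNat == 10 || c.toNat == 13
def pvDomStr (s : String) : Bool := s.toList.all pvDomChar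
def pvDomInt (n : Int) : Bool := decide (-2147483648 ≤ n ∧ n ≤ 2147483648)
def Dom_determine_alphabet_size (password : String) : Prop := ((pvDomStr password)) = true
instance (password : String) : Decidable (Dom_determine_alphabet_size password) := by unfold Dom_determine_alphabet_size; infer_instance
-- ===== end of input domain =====

-- B replaces A's ~13 separate scans of the password by a single pass accumulating
-- boolean flags, followed by the same ordered cascade (objective: alternative, one pass).


-- ===== PORT A =====
-- the character predicates shared by both sources (same literals as the Python)
def pvExt (c : Char) : Bool := "&[|]@^µ§:/ ;.,<>°²³".toList.contains c
def pvStd (c : Char) : Bool := "!#$*%?".toList.contains c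
def pvUptoZ (c : Char) : Bool := PySem.Chars.isalpha c && decide (PySem.Chars.upperChar c ≤ 'Z')
def pvUptoF (c : Char) : Bool := PySem.Chars.isalpha c && decide (PySem.Chars.upperChar c ≤ 'F')
def pvBin (c : Char) : Bool := "01".toList.contains c

def determine_alphabet_size (password : String) : Int :=
  let cs := password.toList
  if cs.any pvExt then 90
  else if cs.any pvStd then 70
  else if cs.any PySem.Chars.isalpha && cs.any PySem.Chars.isdigit then 62
  else if cs.any PySem.Chars.isalpha && cs.any PySem.Chars.islower && cs.any PySem.Chars.isupper then 52
  else if cs.any PySem.Chars.isalpha then 26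
  else if cs.any PySem.Chars.isdigit && cs.any pvUptoZ then 36
  else if cs.any PySem.Chars.isdigit && cs.any pvUptoF then 16
  else if cs.all pvBin then 2
  else if cs.any PySem.Chars.isdigit then 10
  else 70

-- ===== PORT B =====
-- flag state: (ext, std, alpha, digit, lower, upper, uptoZ, uptoF, allBinary)
def pvStep (st : Bool × Bool × Bool × Bool × Bool × Bool × Bool × Bool × Bool) (c : Char) :
    Bool × Bool × Bool × Bool × Bool × Bool × Bool × Bool × Bool :=
  let (e, s, a, d, lo, up, z, f, b) := st
  (e || pvExt c, s || pvStd c, a || PySem.Chars.isalpha c, d || PySem.Chars.isdigit c,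
   lo || PySem.Chars.islower c, up || PySem.Chars.isupper c,
   z || pvUptoZ c, f || pvUptoF c, b && pvBin c)

def determine_alphabet_size_alt (password : String) : Int :=
  let (e, s, a, d, lo, up, z, f, b) :=
    password.toList.foldl pvStep (false, false, false, false, false, false, false, false, true)
  if e then 90
  else if s then 70
  else if a && d then 62
  else if a && lo && up then 52
  else if a then 26
  else if d && z then 36
  else if d && f then 16
  else if b then 2
  else if d then 10
  else 70

-- ===== PRECONDITION & SPEC =====
def Spec_determine_alphabet_size (password : String) (out : Int) : Prop := out = determine_alphabet_size_alt password
instance (password : String) (out : Int) : Decidable (Spec_determine_alphabet_size password out) := by unfold Spec_determine_alphabet_size; infer_instance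

-- ===== CLAIM (what is proved, stated in full; the proofs are below) =====
def Claim_equal_determine_alphabet_size : Prop := ∀ (password : String), Dom_determine_alphabet_size password → Spec_determine_alphabet_size password (determine_alphabet_size password)

-- ===== LEMMAS AND PROOFS =====

-- the one-pass fold computes exactly the nine scans
theorem pvStep_foldl (cs : List Char)
    (e s a d lo up z f b : Bool) :
    cs.foldl pvStep (e, s, a, d, lo, up, z, f, b) =
      (e || cs.any pvExt, s || cs.any pvStd, a || cs.any PySem.Chars.isalpha,
       d || cs.any PySem.Chars.isdigit, lo || cs.any PySem.Chars.islower,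
       up || cs.any PySem.Chars.isupper, z || cs.any pvUptoZ, f || cs.any pvUptoF,
       b && cs.all pvBin) := by
  induction cs generalizing e s a d lo up z f b with
  | nil => simp
  | cons c cs ih =>
      simp [List.foldl_cons, pvStep, ih, Bool.or_assoc, Bool.and_assoc]

theorem determine_alphabet_size_spec : Claim_equal_determine_alphabet_size := by
  intro password _
  unfold Spec_determine_alphabet_size determine_alphabet_size determine_alphabet_size_alt
  rw [pvStep_foldl]
  simp
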